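-- pv_equiv track=rewrite | github.com/theorem46/Yang-Mills-Mass-Gap | 1-Core Validation/exp_core_validation_29_solved_state_decomposition_existence_v1.py | generate_F1
-- ===== SOURCE A (Python) =====
-- def generate_F1(N):
--     x = [0] * N
--     for i in range(1, N):
--         if x[i - 1] == 0:
--             x[i] = 1
--         elif x[i - 1] == 1:
--             x[i] = 2
--         else:
--             x[i] = 0
--
--     # enforce x[i+2] = x[i]
--     for i in range(N - 2):
--         x[i + 2] = x[i]
--
--     return x
-- ===== SOURCE B (Python) =====
-- def generate_F1(N):
--     # Closed form: the two passes always produce the alternating 0,1 pattern.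
--     return [i % 2 for i in range(N)]
-- ===== Notes on version B (the rewrite author's own statement) =====
-- stated objective: simpler
-- what changed: Replaces the two-pass stateful construction (propagate a 0,1,2 cycle, then overwrite with x[i+2]=x[i]) by the closed form [i % 2 for i in range(N)], computing each element independently from its index.
import Mathlib
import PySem

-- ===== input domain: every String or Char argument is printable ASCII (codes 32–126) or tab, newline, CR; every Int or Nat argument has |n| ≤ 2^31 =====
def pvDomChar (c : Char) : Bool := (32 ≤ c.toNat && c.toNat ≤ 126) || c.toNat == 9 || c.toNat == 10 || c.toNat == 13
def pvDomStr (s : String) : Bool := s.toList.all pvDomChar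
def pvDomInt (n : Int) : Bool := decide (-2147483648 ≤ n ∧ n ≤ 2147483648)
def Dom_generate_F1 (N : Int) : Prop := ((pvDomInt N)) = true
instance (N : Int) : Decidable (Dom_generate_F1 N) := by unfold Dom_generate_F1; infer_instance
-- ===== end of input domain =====

-- B replaces A's two stateful passes by the closed form [i % 2 for i in range(N)] (simpler).

-- ===== PORT A =====
def generate_F1 (N : Int) : List Int :=
  -- x = [0] * N  (empty for N ≤ 0, exactly as in Python)
  let x0 : List Int := List.replicate N.toNat 0
  -- for i in range(1, N): x[i] = 1 / 2 / 0 depending on x[i-1]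
  -- (x[i-1] and x[i] are always in range on this loop, so getD/set are exact)
  let x1 := (PySem.List.pyRange 1 N 1).foldl (fun x i =>
    let prev := PySem.List.pyGetD x (i - 1) 0
    x.set i.toNat (if prev = 0 then 1 else if prev = 1 then 2 else 0)) x0
  -- for i in range(N - 2): x[i + 2] = x[i]   (indices always in range)
  (PySem.List.pyRange 0 (N - 2) 1).foldl (fun x i =>
    x.set (i + 2).toNat (PySem.List.pyGetD x i 0)) x1

-- ===== PORT B =====
def generate_F1_alt (N : Int) : List Int :=
  (PySem.List.pyRange 0 N 1).map (fun i => PySem.Int.mod i 2)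

-- ===== PRECONDITION & SPEC =====
def Spec_generate_F1 (N : Int) (out : List Int) : Prop := out = generate_F1_alt N
instance (N : Int) (out : List Int) : Decidable (Spec_generate_F1 N out) := by unfold Spec_generate_F1; infer_instance

-- ===== CLAIM (what is proved, stated in full; the proofs are below) =====
def Claim_equal_generate_F1 : Prop := ∀ (N : Int), Dom_generate_F1 N → Spec_generate_F1 N (generate_F1 N)

-- ===== LEMMAS AND PROOFS =====

-- state of x after the first loop has processed i = 1 .. k-1
def pvF1 (k : Int) (j : Nat) : Int := if (j : Int) < k then (j : Int) % 3 else 0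
-- state of x after the second loop has processed i = 0 .. m-1
def pvF2 (m : Int) (j : Nat) : Int := if (j : Int) < m + 2 then (j : Int) % 2 else (j : Int) % 3

-- invariant of the first loop
theorem pvLoop1 (n : Nat) (m : Nat) (h : 1 + (m : Int) ≤ (n : Int)) :
    (PySem.List.pyRange 1 (1 + m) 1).foldl (fun x i =>
      let prev := PySem.List.pyGetD x (i - 1) 0
      x.set i.toNat (if prev = 0 then 1 else if prev = 1 then 2 else 0))
      (List.replicate n (0 : Int))
    = (List.range n).map (pvF1 (1 + m)) := by
  induction m with
  | zero =>
      rw [show ((1 : Int) + ((0:Nat):Int)) = 1 by norm_num, PySem.List.pyRange_one_eq_nil (by omega)]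
      simp only [List.foldl_nil]
      apply List.ext_getElem (by simp)
      intro j h1 h2
      simp only [List.getElem_replicate, List.getElem_map, List.getElem_range, pvF1]
      split <;> omega
  | succ m ih =>
      rw [show ((1 : Int) + (m + 1 : Nat)) = (1 + (m : Int)) + 1 by push_cast; ring,
        PySem.List.pyRange_one_succ_right (by omega), List.foldl_append,
        ih (by push_cast at h ⊢; omega)]
      simp only [List.foldl_cons, List.foldl_nil]
      have hprev : PySem.List.pyGetD ((List.range n).map (pvF1 (1 + m))) ((1 + (m : Int)) - 1) 0
          = (m : Int) % 3 := by
        rw [show ((1 : Int) + m) - 1 = (m : Nat) by push_cast; ring]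
        rw [PySem.List.pyGetD_natCast]
        rw [List.getD_eq_getElem?_getD, List.getElem?_map, List.getElem?_range (by omega)]
        simp [pvF1]
      rw [hprev]
      apply List.ext_getElem (by simp)
      intro j h1 h2
      simp only [List.length_range] at h1
      rw [List.getElem_set]
      simp only [List.getElem_map, List.getElem_range, pvF1]
      split
      · split <;> split <;> omega
      · split <;> split <;> omega

-- invariant of the second loop
theorem pvLoop2 (n : Nat) (m : Nat) (h : (m : Int) + 2 ≤ (n : Int)) :
    (PySem.List.pyRange 0 (m : Int) 1).foldl (fun x i =>
      x.set (i + 2).toNat (PySem.List.pyGetD x i 0))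
      ((List.range n).map (pvF2 0))
    = (List.range n).map (pvF2 m) := by
  induction m with
  | zero => rw [PySem.List.pyRange_one_eq_nil (by omega)]; simp
  | succ m ih =>
      rw [show ((m + 1 : Nat) : Int) = (m : Int) + 1 by push_cast; ring,
        PySem.List.pyRange_one_succ_right (by omega), List.foldl_append,
        ih (by push_cast at h ⊢; omega)]
      simp only [List.foldl_cons, List.foldl_nil]
      have hget : PySem.List.pyGetD ((List.range n).map (pvF2 m)) (m : Int) 0 = (m : Int) % 2 := by
        rw [PySem.List.pyGetD_natCast]
        rw [List.getD_eq_getElem?_getD, List.getElem?_map, List.getElem?_range (by omega)]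
        simp [pvF2]
      rw [hget]
      apply List.ext_getElem (by simp)
      intro j h1 h2
      simp only [List.length_range] at h1
      rw [List.getElem_set]
      simp only [List.getElem_map, List.getElem_range, pvF2]
      have : ((m : Int) + 2).toNat = m + 2 := by omega
      rw [this]
      split
      · split <;> omega
      · split <;> split <;> omega

-- ===== VERDICT (by name: the statement is the Claim_ definition above) =====
theorem generate_F1_spec : Claim_equal_generate_F1 := by
  intro N _
  simp only [Spec_generate_F1, generate_F1, generate_F1_alt]
  by_cases hN : N ≤ 0
  · rw [PySem.List.pyRange_one_eq_nil (by omega), PySem.List.pyRange_one_eq_nil (by omega),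
      PySem.List.pyRange_one_eq_nil (by omega)]
    simp [show N.toNat = 0 by omega]
  · replace hN : 0 < N := by omega
    set n : Nat := N.toNat with hn
    have hNn : N = (n : Int) := by omega
    -- first loop: N = 1 + (n-1)
    have h1 : (PySem.List.pyRange 1 N 1).foldl (fun x i =>
        let prev := PySem.List.pyGetD x (i - 1) 0
        x.set i.toNat (if prev = 0 then 1 else if prev = 1 then 2 else 0))
        (List.replicate N.toNat (0 : Int)) = (List.range n).map (pvF1 N) := by
      have := pvLoop1 n (n - 1) (by omega)
      rw [show (1 + ((n:Nat) - 1 : Nat) : Int) = N by omega] at this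
      rw [← hn, this]
    rw [h1]
    -- the first-loop result equals the base state of the second loop
    have hbase : (List.range n).map (pvF1 N) = (List.range n).map (pvF2 0) := by
      apply List.ext_getElem (by simp)
      intro j h1 h2
      have hj : j < n := by simpa using h1
      simp only [List.getElem_map, List.getElem_range, pvF1, pvF2]
      have : (j : Int) < N := by omega
      split <;> split <;> omega
    rw [hbase]
    by_cases h2 : 2 ≤ N
    · have := pvLoop2 n (n - 2) (by omega)
      rw [show (((n:Nat) - 2 : Nat) : Int) = N - 2 by omega] at this
      rw [this]
      rw [PySem.List.pyRange_one, hNn]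
      simp only [Int.sub_zero, Int.toNat_natCast, List.map_map]
      apply List.ext_getElem (by simp)
      intro j hj1 hj2
      have hjn : j < n := by simpa using hj1
      simp only [List.getElem_map, List.getElem_range, Function.comp, pvF2,
        PySem.Int.mod_eq_emod_of_pos (by omega : (0:Int) < 2)]
      split <;> omega
    · -- N = 1 : the second loop is empty and pvF2 0 is already i % 2
      rw [PySem.List.pyRange_one_eq_nil (by omega)]
      simp only [List.foldl_nil]
      rw [PySem.List.pyRange_one, hNn]
      simp only [Int.sub_zero, Int.toNat_natCast, List.map_map]
      apply List.ext_getElem (by simp)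
      intro j hj1 hj2
      have hjn : j < n := by simpa using hj1
      simp only [List.getElem_map, List.getElem_range, Function.comp, pvF2,
        PySem.Int.mod_eq_emod_of_pos (by omega : (0:Int) < 2)]
      split <;> omega
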